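-- pv_equiv track=rewrite | github.com/xmjlmm/school_learning | 判断字符串是否为数字/isnumeric.py | use_isnumeric
-- ===== SOURCE A (Python) =====
-- def use_isnumeric(x:str) -> int:
--     curlen, curstr, maxlen, maxstr = 0, '', 0, ''
--     for i, v in enumerate(x):
--         if v.isnumeric():
--             curlen += 1
--             curstr += v
--             if curlen > maxlen:
--                 maxlen = curlen
--                 maxstr = curstr
--         else:
--             curlen = 0
--             curstr = ''
--     return (maxstr, maxlen)
-- ===== SOURCE B (Python) =====
-- def use_isnumeric(x: str):
--     # phase 1: collect every maximal numeric run
--     runs = []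
--     cur = ''
--     for ch in x:
--         if ch.isnumeric():
--             cur += ch
--         else:
--             if cur:
--                 runs.append(cur)
--             cur = ''
--     if cur:
--         runs.append(cur)
--     # phase 2: pick the first strictly-longest run
--     best = ''
--     for r in runs:
--         if len(r) > len(best):
--             best = r
--     return (best, len(best))
-- ===== Notes on version B (the rewrite author's own statement) =====
-- stated objective: alternative
-- what changed: B splits the string into the list of all maximal numeric runs first and then selects the first strictly-longest run in a second pass, instead of A's single loop that maintains a running maximum updated eagerly on every character.
import Mathlib
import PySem

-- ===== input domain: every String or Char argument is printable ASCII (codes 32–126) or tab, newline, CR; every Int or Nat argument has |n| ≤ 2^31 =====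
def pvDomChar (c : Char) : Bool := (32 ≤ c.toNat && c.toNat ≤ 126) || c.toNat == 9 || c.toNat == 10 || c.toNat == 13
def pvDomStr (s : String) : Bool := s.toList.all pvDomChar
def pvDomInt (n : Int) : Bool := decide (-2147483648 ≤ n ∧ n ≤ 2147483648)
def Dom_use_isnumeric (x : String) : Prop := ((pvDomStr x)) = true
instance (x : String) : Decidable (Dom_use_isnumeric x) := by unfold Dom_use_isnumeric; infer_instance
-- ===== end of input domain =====

-- B collects all maximal numeric runs in one pass and then selects the first strictly-longest
-- run in a second pass, instead of A's single loop with an eagerly updated running maximum.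


-- ===== PORT A =====
-- On the printable-ASCII domain, str.isnumeric() holds exactly for '0'..'9' = PySem.Chars.isdigit.
-- The loop index i of `enumerate` is unused in A and is not carried.
def use_isnumeric_go : List Char → Int → List Char → Int → List Char → String × Int
  | [], _, _, maxlen, maxstr => (String.ofList maxstr, maxlen)
  | v :: rest, curlen, curstr, maxlen, maxstr =>
    if PySem.Chars.isdigit v then
      let curlen' := curlen + 1
      let curstr' := curstr ++ [v]
      if curlen' > maxlen then use_isnumeric_go rest curlen' curstr' curlen' curstr'
      else use_isnumeric_go rest curlen' curstr' maxlen maxstr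
    else use_isnumeric_go rest 0 [] maxlen maxstr

def use_isnumeric (x : String) : String × Int :=
  use_isnumeric_go x.toList 0 [] 0 []

-- ===== PORT B =====
-- phase 1 of Source B: the for-loop accumulating `cur` and appending finished runs
def runsB : List Char → List Char → List (List Char)
  | cur, [] => if cur = [] then [] else [cur]
  | cur, ch :: rest =>
    if PySem.Chars.isdigit ch then runsB (cur ++ [ch]) rest
    else if cur = [] then runsB [] rest else cur :: runsB [] rest

-- phase 2 of Source B: first strictly-longest run
def bestB (runs : List (List Char)) : List Char :=
  runs.foldl (fun best r => if r.length > best.length then r else best) []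

def use_isnumeric_alt (x : String) : String × Int :=
  let best := bestB (runsB [] x.toList)
  (String.ofList best, (best.length : Int))

-- ===== PRECONDITION & SPEC =====
def Spec_use_isnumeric (x : String) (out : String × Int) : Prop := out = use_isnumeric_alt x
instance (x : String) (out : String × Int) : Decidable (Spec_use_isnumeric x out) := by unfold Spec_use_isnumeric; infer_instance

-- ===== CLAIM (what is proved, stated in full; the proofs are below) =====
def Claim_equal_use_isnumeric : Prop := ∀ (x : String), Dom_use_isnumeric x → Spec_use_isnumeric x (use_isnumeric x)

-- ===== LEMMAS AND PROOFS =====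

-- the head of a run list started with a nonempty pending run extends that pending run
theorem runsB_head (cs : List Char) : ∀ (cur : List Char), cur ≠ [] →
    ∃ t rs, runsB cur cs = (cur ++ t) :: rs := by
  induction cs with
  | nil => intro cur h; exact ⟨[], [], by simp [runsB, h]⟩
  | cons c cs ih =>
    intro cur h
    by_cases hd : PySem.Chars.isdigit c
    · obtain ⟨t, rs, ht⟩ := ih (cur ++ [c]) (by simp)
      exact ⟨[c] ++ t, rs, by simp [runsB, hd, ht]⟩
    · exact ⟨[], runsB [] cs, by simp [runsB, hd, h]⟩

-- absorbing an eager pick of a prefix of the next run into the fold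
theorem foldl_pick_absorb (rs : List (List Char)) (a b r : List Char) (h : b <+: r) :
    List.foldl (fun best r => if r.length > best.length then r else best)
      (if b.length > a.length then b else a) (r :: rs)
    = List.foldl (fun best r => if r.length > best.length then r else best) a (r :: rs) := by
  have hle : b.length ≤ r.length := h.length_le
  simp only [List.foldl_cons]
  congr 1
  by_cases hba : b.length > a.length
  · simp only [if_pos hba]
    by_cases hra : r.length > a.length
    · simp only [if_pos hra]
      by_cases hrb : r.length > b.length
      · simp [hrb]
      · have : b.length = r.length := le_antisymm hle (by omega)
        have : b = r := List.IsPrefix.eq_of_length h this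
        simp [this]
    · omega
  · simp [hba]

-- main invariant: the A-loop from any state whose pending run is dominated by the max
-- computes the fold of B's run list (first run prefixed by the pending run) from the max
theorem go_eq (cs : List Char) : ∀ (curstr maxstr : List Char),
    curstr.length ≤ maxstr.length →
    use_isnumeric_go cs (curstr.length : Int) curstr (maxstr.length : Int) maxstr
      = (String.ofList (List.foldl (fun best r => if r.length > best.length then r else best) maxstr (runsB curstr cs)),
         ((List.foldl (fun best r => if r.length > best.length then r else best) maxstr (runsB curstr cs)).length : Int)) := by
  induction cs with
  | nil =>
    intro curstr maxstr hle
    by_cases hc : curstr = [] <;>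
      simp [use_isnumeric_go, runsB, hc, Nat.not_lt.mpr hle]
  | cons c cs ih =>
    intro curstr maxstr hle
    have hlen : (curstr ++ [c]).length = curstr.length + 1 := by simp
    by_cases hd : PySem.Chars.isdigit c = true
    · rw [use_isnumeric_go, if_pos hd, runsB, if_pos hd]
      by_cases hgt : (curstr ++ [c]).length > maxstr.length
      · have hgt' : ((curstr.length : Int) + 1 > (maxstr.length : Int)) := by omega
        rw [if_pos hgt']
        rw [show (curstr.length : Int) + 1 = ((curstr ++ [c]).length : Int) by push_cast [hlen]; ring]
        rw [ih (curstr ++ [c]) (curstr ++ [c]) le_rfl]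
        obtain ⟨t, rs, ht⟩ := runsB_head cs (curstr ++ [c]) (by simp)
        have habs := foldl_pick_absorb rs maxstr (curstr ++ [c]) (curstr ++ [c] ++ t) ⟨t, rfl⟩
        rw [if_pos hgt] at habs
        rw [ht, habs]
      · have hgt' : ¬ ((curstr.length : Int) + 1 > (maxstr.length : Int)) := by omega
        rw [if_neg hgt']
        rw [show (curstr.length : Int) + 1 = ((curstr ++ [c]).length : Int) by push_cast [hlen]; ring]
        rw [ih (curstr ++ [c]) maxstr (by omega)]
    · rw [use_isnumeric_go, if_neg hd, runsB, if_neg hd]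
      have h1 := ih [] maxstr (by simp)
      simp only [List.length_nil, Nat.cast_zero] at h1
      rw [h1]
      by_cases hc : curstr = []
      · rw [if_pos hc]
      · rw [if_neg hc]
        simp only [List.foldl_cons]
        rw [if_neg (by omega : ¬ curstr.length > maxstr.length)]

-- ===== VERDICT (by name: the statement is the Claim_ definition above) =====
theorem use_isnumeric_spec : Claim_equal_use_isnumeric := by
  intro x _
  show use_isnumeric x = use_isnumeric_alt x
  have h := go_eq x.toList [] [] (by simp)
  simpa [use_isnumeric, use_isnumeric_alt, bestB] using h
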